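-- pv_equiv track=rewrite | github.com/Mohammad-Fleity2002/Wordle-Game | main.py | select_random_words
-- ===== SOURCE A (Python) =====
-- def select_random_words(words_list, limit=60):
--     selected_words = {}
--     selected_desc = {}
--     total_selected = 0
--     for description, words in words_list:
--         if total_selected >= limit:
--             break
--         for i, word in enumerate(words):
--             if total_selected >= limit:
--                 break
--             selected_words["word" + str(total_selected)] = word
--             selected_desc["desc" + str(total_selected)] = description
--             # {
--             #     "word": word,
--             #     "description": description  # Add description to each selected word
--             # }
--             total_selected += 1
--     return selected_words, selected_desc
-- ===== SOURCE B (Python) =====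
-- def select_random_words(words_list, limit=60):
--     pairs = [(w, d) for d, ws in words_list for w in ws]
--     pairs = pairs[:max(limit, 0)]
--     selected_words = {"word" + str(i): w for i, (w, _) in enumerate(pairs)}
--     selected_desc = {"desc" + str(i): d for i, (_, d) in enumerate(pairs)}
--     return selected_words, selected_desc
-- ===== Notes on version B (the rewrite author's own statement) =====
-- stated objective: simpler
-- what changed: Replaces the interleaved nested loops with a shared counter and two break statements by a flatten-then-slice pipeline: build the flat (word, description) pair list, cut it to max(limit, 0), and construct each dict in a separate enumerate-based comprehension.
import Mathlib
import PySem

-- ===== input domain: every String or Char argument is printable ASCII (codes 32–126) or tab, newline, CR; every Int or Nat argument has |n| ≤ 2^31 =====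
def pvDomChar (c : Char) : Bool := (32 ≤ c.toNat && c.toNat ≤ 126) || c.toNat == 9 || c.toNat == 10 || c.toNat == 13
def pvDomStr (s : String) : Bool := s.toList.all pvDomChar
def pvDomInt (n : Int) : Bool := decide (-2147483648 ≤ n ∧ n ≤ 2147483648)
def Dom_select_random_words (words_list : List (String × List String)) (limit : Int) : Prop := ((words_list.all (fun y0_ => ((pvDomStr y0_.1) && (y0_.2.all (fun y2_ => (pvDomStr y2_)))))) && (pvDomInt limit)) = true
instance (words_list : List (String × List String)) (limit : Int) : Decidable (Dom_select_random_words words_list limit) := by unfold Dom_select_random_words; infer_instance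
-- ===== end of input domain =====

-- B replaces A's nested loops + shared counter + breaks by flatten, slice to max(limit,0),
-- and two enumerate-based dict comprehensions (objective: simpler).

-- ===== PORT A =====
-- inner 'for i, word in enumerate(words)': the index i is unused in A, so the
-- transliteration walks the list directly; 'break' is the early return of the recursion.
def pvInnerA (limit : Int) (description : String) :
    List String →
    PySem.Dict String String × PySem.Dict String String × Int →
    PySem.Dict String String × PySem.Dict String String × Int
  | [], st => st
  | word :: ws, (d1, d2, t) =>
      if t ≥ limit then (d1, d2, t)
      else pvInnerA limit description ws
        (d1.insert ("word" ++ PySem.Int.toStr t) word,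
         d2.insert ("desc" ++ PySem.Int.toStr t) description,
         t + 1)

def pvOuterA (limit : Int) :
    List (String × List String) →
    PySem.Dict String String × PySem.Dict String String × Int →
    PySem.Dict String String × PySem.Dict String String × Int
  | [], st => st
  | (description, words) :: rest, st =>
      if st.2.2 ≥ limit then st
      else pvOuterA limit rest (pvInnerA limit description words st)

def select_random_words (words_list : List (String × List String)) (limit : Int) :
    (List (String × String)) × (List (String × String)) :=
  let st := pvOuterA limit words_list (PySem.Dict.empty, PySem.Dict.empty, 0)
  (st.1.items, st.2.1.items)

-- ===== PORT B =====
-- pairs = [(w, d) for d, ws in words_list for w in ws]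
def pvFlat (words_list : List (String × List String)) : List (String × String) :=
  words_list.flatMap (fun p => p.2.map (fun w => (w, p.1)))

def select_random_words_alt (words_list : List (String × List String)) (limit : Int) :
    (List (String × String)) × (List (String × String)) :=
  let pairs := pvFlat words_list
  let pairs2 := PySem.List.slice pairs none (some (max limit 0))
  let d1 := (PySem.List.enumerate pairs2 0).foldl
    (fun d q => d.insert ("word" ++ PySem.Int.toStr q.1) q.2.1) PySem.Dict.empty
  let d2 := (PySem.List.enumerate pairs2 0).foldl
    (fun d q => d.insert ("desc" ++ PySem.Int.toStr q.1) q.2.2) PySem.Dict.empty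
  (d1.items, d2.items)

-- ===== PRECONDITION & SPEC =====
def Spec_select_random_words (words_list : List (String × List String)) (limit : Int) (out : (List (String × String)) × (List (String × String))) : Prop := out = select_random_words_alt words_list limit
instance (words_list : List (String × List String)) (limit : Int) (out : (List (String × String)) × (List (String × String))) : Decidable (Spec_select_random_words words_list limit out) := by unfold Spec_select_random_words; infer_instance

-- ===== CLAIM (what is proved, stated in full; the proofs are below) =====
def Claim_equal_select_random_words : Prop := ∀ (words_list : List (String × List String)) (limit : Int), Dom_select_random_words words_list limit → Spec_select_random_words words_list limit (select_random_words words_list limit)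

-- ===== LEMMAS AND PROOFS =====

-- generic fold that both programs reduce to: insert the pairs in order, counting from t
def pvG (ps : List (String × String))
    (st : PySem.Dict String String × PySem.Dict String String × Int) :
    PySem.Dict String String × PySem.Dict String String × Int :=
  ps.foldl (fun st p =>
    (st.1.insert ("word" ++ PySem.Int.toStr st.2.2) p.1,
     st.2.1.insert ("desc" ++ PySem.Int.toStr st.2.2) p.2,
     st.2.2 + 1)) st

theorem pvG_nil (st : PySem.Dict String String × PySem.Dict String String × Int) :
    pvG [] st = st := rfl

theorem pvG_cons (p : String × String) (ps : List (String × String))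
    (d1 d2 : PySem.Dict String String) (t : Int) :
    pvG (p :: ps) (d1, d2, t) =
      pvG ps (d1.insert ("word" ++ PySem.Int.toStr t) p.1,
              d2.insert ("desc" ++ PySem.Int.toStr t) p.2, t + 1) := rfl

theorem pvG_append (ps qs : List (String × String))
    (st : PySem.Dict String String × PySem.Dict String String × Int) :
    pvG (ps ++ qs) st = pvG qs (pvG ps st) := List.foldl_append

theorem pvG_counter (ps : List (String × String)) :
    ∀ (d1 d2 : PySem.Dict String String) (t : Int),
      (pvG ps (d1, d2, t)).2.2 = t + ps.length := by
  induction ps with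
  | nil => intro d1 d2 t; simp [pvG_nil]
  | cons p ps ih =>
    intro d1 d2 t
    rw [pvG_cons, ih]
    simp; omega

theorem pvInnerA_eq (limit : Int) (description : String) (ws : List String) :
    ∀ (d1 d2 : PySem.Dict String String) (t : Int),
      pvInnerA limit description ws (d1, d2, t) =
        pvG ((ws.take (limit - t).toNat).map (fun w => (w, description))) (d1, d2, t) := by
  induction ws with
  | nil => intro d1 d2 t; simp [pvInnerA, pvG_nil]
  | cons w ws ih =>
    intro d1 d2 t
    by_cases h : t ≥ limit
    · have h0 : (limit - t).toNat = 0 := by omega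
      simp [pvInnerA, h, h0, pvG_nil]
    · have hk : (limit - t).toNat = (limit - (t + 1)).toNat + 1 := by omega
      rw [pvInnerA, if_neg h, ih, hk, List.take_succ_cons, List.map_cons, pvG_cons]

theorem pvOuterA_eq (limit : Int) (wl : List (String × List String)) :
    ∀ (d1 d2 : PySem.Dict String String) (t : Int),
      pvOuterA limit wl (d1, d2, t) =
        pvG ((pvFlat wl).take (limit - t).toNat) (d1, d2, t) := by
  induction wl with
  | nil => intro d1 d2 t; simp [pvOuterA, pvFlat, pvG_nil]
  | cons hd rest ih =>
    intro d1 d2 t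
    obtain ⟨description, words⟩ := hd
    by_cases h : t ≥ limit
    · have h0 : (limit - t).toNat = 0 := by omega
      simp [pvOuterA, h, h0, pvG_nil]
    · rw [pvOuterA, if_neg h, pvInnerA_eq, ih, pvG_counter]
      have hflat : pvFlat ((description, words) :: rest)
          = words.map (fun w => (w, description)) ++ pvFlat rest := by
        simp [pvFlat]
      rw [hflat, List.take_append, ← List.map_take, pvG_append]
      have harith :
          (limit - (t + (((words.take (limit - t).toNat).map
              (fun w => (w, description))).length : Int))).toNat
            = (limit - t).toNat - words.length := by
        simp only [List.length_map, List.length_take]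
        omega
      rw [harith]
      simp only [List.length_map]
      have hc := pvG_counter ((words.take (limit - t).toNat).map (fun w => (w, description))) d1 d2 t
      simp only [List.length_map] at hc
      rw [← hc]

theorem pvG_fst (ps : List (String × String)) :
    ∀ (t : Int) (d1 d2 : PySem.Dict String String),
      (pvG ps (d1, d2, t)).1 =
        (PySem.List.enumerate ps t).foldl
          (fun d q => d.insert ("word" ++ PySem.Int.toStr q.1) q.2.1) d1 := by
  induction ps with
  | nil => intro t d1 d2; simp [pvG_nil, PySem.List.enumerate_nil]
  | cons p ps ih =>
    intro t d1 d2
    rw [pvG_cons, ih, PySem.List.enumerate_cons]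
    rfl

theorem pvG_snd (ps : List (String × String)) :
    ∀ (t : Int) (d1 d2 : PySem.Dict String String),
      (pvG ps (d1, d2, t)).2.1 =
        (PySem.List.enumerate ps t).foldl
          (fun d q => d.insert ("desc" ++ PySem.Int.toStr q.1) q.2.2) d2 := by
  induction ps with
  | nil => intro t d1 d2; simp [pvG_nil, PySem.List.enumerate_nil]
  | cons p ps ih =>
    intro t d1 d2
    rw [pvG_cons, ih, PySem.List.enumerate_cons]
    rfl

theorem pvSlice_take (xs : List (String × String)) (limit : Int) :
    PySem.List.slice xs none (some (max limit 0)) = xs.take limit.toNat := by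
  rw [← Int.ofNat_toNat limit, PySem.List.slice_to_natCast]

-- ===== VERDICT (by name: the statement is the Claim_ definition above) =====
theorem select_random_words_spec : Claim_equal_select_random_words := by
  intro wl limit _
  have h := pvOuterA_eq limit wl PySem.Dict.empty PySem.Dict.empty 0
  simp only [sub_zero] at h
  simp only [Spec_select_random_words, select_random_words, select_random_words_alt,
    pvSlice_take, h, pvG_fst, pvG_snd]
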